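-- pv_equiv track=rewrite | github.com/Dovchik/nand2tetris | hack_assembler/main.py | prepare_file_lines
-- ===== SOURCE A (Python) =====
-- def prepare_file_lines(file):
--     file_lines = []
--     link_lines = {}
--     prepared = []
--     for i, line in enumerate(file):
--         trimed = "".join(line.split())
--         if trimed.startswith('//'):
--             continue
--         if len(trimed) == 0:
--             continue
--         trimed = trimed.split('//')[0]
--         prepared.append(trimed)
--     c = 0
--     for i, line in enumerate(prepared):
--         if line.startswith('(') and line.endswith(')'):
--             link_lines[line[1:-1]] = i - c
--             c += 1
--         else:
--             file_lines.append(line)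
--     return file_lines, link_lines
-- ===== SOURCE B (Python) =====
-- def prepare_file_lines(file):
--     # Single pass: clean each raw line and classify it immediately; the label
--     # address is the current number of emitted code lines (no counter, no
--     # intermediate 'prepared' list).
--     file_lines = []
--     link_lines = {}
--     for line in file:
--         trimed = "".join(line.split())
--         if trimed.startswith('//') or not trimed:
--             continue
--         trimed = trimed.split('//')[0]
--         if trimed.startswith('(') and trimed.endswith(')'):
--             link_lines[trimed[1:-1]] = len(file_lines)
--         else:
--             file_lines.append(trimed)
--     return file_lines, link_lines
-- ===== Notes on version B (the rewrite author's own statement) =====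
-- stated objective: simpler
-- what changed: One fused pass over the raw lines replacing A's two passes with an intermediate 'prepared' list and a label counter: each line is cleaned and classified immediately, and a label's address is simply len(file_lines) instead of A's enumerate index minus a running counter.
import Mathlib
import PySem

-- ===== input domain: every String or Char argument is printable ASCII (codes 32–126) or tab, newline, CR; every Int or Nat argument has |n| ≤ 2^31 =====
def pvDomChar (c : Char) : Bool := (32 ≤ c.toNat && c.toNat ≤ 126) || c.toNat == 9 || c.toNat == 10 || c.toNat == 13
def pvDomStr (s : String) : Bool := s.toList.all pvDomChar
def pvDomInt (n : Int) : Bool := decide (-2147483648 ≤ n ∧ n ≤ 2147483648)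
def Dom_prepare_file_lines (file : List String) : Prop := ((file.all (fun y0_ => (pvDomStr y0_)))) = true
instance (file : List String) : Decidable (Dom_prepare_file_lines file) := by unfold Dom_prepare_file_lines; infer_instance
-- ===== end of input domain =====

-- B fuses A's two passes into one pass over the raw lines, replacing the
-- intermediate 'prepared' list and the label counter by len(file_lines).

-- ===== PORT A =====
def prepare_file_lines (file : List String) : List String × (List (String × Int)) :=
  let prepared : List String :=
    (PySem.List.enumerate file).foldl (fun prepared p =>
      let line := p.2
      let trimed := PySem.Str.join "" (PySem.Str.split₀ line)
      if PySem.Str.startswith trimed "//" then prepared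
      else if PySem.Str.len trimed = 0 then prepared
      else prepared ++ [(((PySem.Str.split? trimed "//").getD []).headD "")]) []
  let st :=
    (PySem.List.enumerate prepared).foldl
      (fun (st : List String × PySem.Dict String Int × Int) p =>
        let i := p.1
        let line := p.2
        if PySem.Str.startswith line "(" && PySem.Str.endswith line ")" then
          (st.1, (st.2.1).insert (PySem.Str.slice line (some 1) (some (-1))) (i - st.2.2), st.2.2 + 1)
        else (st.1 ++ [line], st.2.1, st.2.2))
      ([], PySem.Dict.empty, 0)
  (st.1, st.2.1.items)

-- ===== PORT B =====
def prepare_file_lines_alt (file : List String) : List String × (List (String × Int)) :=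
  let st :=
    file.foldl
      (fun (st : List String × PySem.Dict String Int) line =>
        let trimed := PySem.Str.join "" (PySem.Str.split₀ line)
        if PySem.Str.startswith trimed "//" || PySem.Str.len trimed = 0 then st
        else
          let trimed := ((PySem.Str.split? trimed "//").getD []).headD ""
          if PySem.Str.startswith trimed "(" && PySem.Str.endswith trimed ")" then
            (st.1, st.2.insert (PySem.Str.slice trimed (some 1) (some (-1))) (st.1.length : Int))
          else (st.1 ++ [trimed], st.2))
      ([], PySem.Dict.empty)
  (st.1, st.2.items)

-- ===== PRECONDITION & SPEC =====
def Spec_prepare_file_lines (file : List String) (out : List String × (List (String × Int))) : Prop := out = prepare_file_lines_alt file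
instance (file : List String) (out : List String × (List (String × Int))) : Decidable (Spec_prepare_file_lines file out) := by unfold Spec_prepare_file_lines; infer_instance

-- ===== CLAIM (what is proved, stated in full; the proofs are below) =====
def Claim_equal_prepare_file_lines : Prop := ∀ (file : List String), Dom_prepare_file_lines file → Spec_prepare_file_lines file (prepare_file_lines file)

-- ===== LEMMAS AND PROOFS =====

/-- Cleaning one raw line: `none` if the line is skipped, otherwise the
    whitespace-stripped, comment-stripped content. -/
def pvClean (line : String) : Option String :=
  let trimed := PySem.Str.join "" (PySem.Str.split₀ line)
  if PySem.Str.startswith trimed "//" then none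
  else if PySem.Str.len trimed = 0 then none
  else some (((PySem.Str.split? trimed "//").getD []).headD "")

/-- A's first-pass step, expressed through `pvClean`. -/
def pvStep1 (prepared : List String) (p : Int × String) : List String :=
  match pvClean p.2 with
  | none => prepared
  | some t => prepared ++ [t]

/-- A's second-pass step (state: file_lines, link_lines, counter c). -/
def pvStepA (st : List String × PySem.Dict String Int × Int) (p : Int × String) :
    List String × PySem.Dict String Int × Int :=
  if PySem.Str.startswith p.2 "(" && PySem.Str.endswith p.2 ")" then
    (st.1, (st.2.1).insert (PySem.Str.slice p.2 (some 1) (some (-1))) (p.1 - st.2.2), st.2.2 + 1)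
  else (st.1 ++ [p.2], st.2.1, st.2.2)

/-- B's classification step on an already-cleaned line. -/
def pvStepB (st : List String × PySem.Dict String Int) (line : String) :
    List String × PySem.Dict String Int :=
  if PySem.Str.startswith line "(" && PySem.Str.endswith line ")" then
    (st.1, st.2.insert (PySem.Str.slice line (some 1) (some (-1))) (st.1.length : Int))
  else (st.1 ++ [line], st.2)

lemma pvStep1_eq :
    (fun (prepared : List String) (p : Int × String) =>
      let line := p.2
      let trimed := PySem.Str.join "" (PySem.Str.split₀ line)
      if PySem.Str.startswith trimed "//" then prepared
      else if PySem.Str.len trimed = 0 then prepared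
      else prepared ++ [(((PySem.Str.split? trimed "//").getD []).headD "")]) = pvStep1 := by
  funext prepared p
  simp only [pvStep1, pvClean]
  split <;> rename_i h
  · simp
  · split <;> rename_i h2
    · simp
    · simp

lemma pvStepBfused_eq :
    (fun (st : List String × PySem.Dict String Int) (line : String) =>
      let trimed := PySem.Str.join "" (PySem.Str.split₀ line)
      if PySem.Str.startswith trimed "//" || PySem.Str.len trimed = 0 then st
      else
        let trimed := ((PySem.Str.split? trimed "//").getD []).headD ""
        if PySem.Str.startswith trimed "(" && PySem.Str.endswith trimed ")" then
          (st.1, st.2.insert (PySem.Str.slice trimed (some 1) (some (-1))) (st.1.length : Int))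
        else (st.1 ++ [trimed], st.2))
    = (fun st line => match pvClean line with
        | none => st
        | some t => pvStepB st t) := by
  funext st line
  unfold pvClean pvStepB
  by_cases h : PySem.Str.startswith (PySem.Str.join "" (PySem.Str.split₀ line)) "//"
  · simp only [h, Bool.true_or, if_true]
  · by_cases h2 : PySem.Str.len (PySem.Str.join "" (PySem.Str.split₀ line)) = 0
    · simp only [h, h2, decide_true, Bool.or_true, if_true, Bool.false_eq_true, if_false]
    · simp only [h, h2, decide_false, Bool.or_false, Bool.false_eq_true, if_false]

/-- A's first pass is `filterMap pvClean`. -/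
lemma pvLoop1_eq (file : List String) (s : Int) (acc : List String) :
    (PySem.List.enumerate file s).foldl pvStep1 acc = acc ++ file.filterMap pvClean := by
  induction file generalizing s acc with
  | nil => simp [PySem.List.enumerate_nil]
  | cons x xs ih =>
    rw [PySem.List.enumerate_cons, List.foldl_cons, List.filterMap_cons]
    cases h : pvClean x with
    | none => rw [show pvStep1 acc (s, x) = acc by simp [pvStep1, h], ih]
    | some t =>
      rw [show pvStep1 acc (s, x) = acc ++ [t] by simp [pvStep1, h], ih]
      simp

/-- A's second pass with the index invariant `s - c = |file_lines|` agrees with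
    B's counter-free classification fold, on both components B keeps. -/
lemma pvLoop2_eq (prepared : List String) (s c : Int) (fl : List String)
    (ll : PySem.Dict String Int) (h : s - c = (fl.length : Int)) :
    ((PySem.List.enumerate prepared s).foldl pvStepA (fl, ll, c)).1
        = (prepared.foldl pvStepB (fl, ll)).1
    ∧ ((PySem.List.enumerate prepared s).foldl pvStepA (fl, ll, c)).2.1
        = (prepared.foldl pvStepB (fl, ll)).2 := by
  induction prepared generalizing s c fl ll with
  | nil => simp [PySem.List.enumerate_nil]
  | cons x xs ih =>
    rw [PySem.List.enumerate_cons]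
    simp only [List.foldl_cons, pvStepA, pvStepB]
    split
    · rw [show s - c = (fl.length : Int) from h]
      exact ih (s + 1) (c + 1) fl _ (by omega)
    · exact ih (s + 1) c (fl ++ [x]) ll (by simp; omega)

/-- Folding the classification over the cleaned lines only. -/
lemma pvFoldMatch_eq (l : List String) (st : List String × PySem.Dict String Int) :
    l.foldl (fun st line => match pvClean line with
        | none => st
        | some t => pvStepB st t) st
    = (l.filterMap pvClean).foldl pvStepB st := by
  induction l generalizing st with
  | nil => simp
  | cons x xs ih =>
    rw [List.foldl_cons, List.filterMap_cons]
    cases h : pvClean x with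
    | none => exact ih st
    | some t => simpa using ih (pvStepB st t)

-- ===== VERDICT (by name: the statement is the Claim_ definition above) =====
theorem prepare_file_lines_spec : Claim_equal_prepare_file_lines := by
  intro file _
  unfold Spec_prepare_file_lines prepare_file_lines prepare_file_lines_alt
  rw [pvStep1_eq, pvStepBfused_eq, pvFoldMatch_eq, pvLoop1_eq]
  simp only [List.nil_append]
  have h2 := pvLoop2_eq (file.filterMap pvClean) 0 0 [] PySem.Dict.empty (by simp)
  exact Prod.ext h2.1 (congrArg PySem.Dict.items h2.2)
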